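-- pv_equiv track=rewrite | github.com/tanaypatil/code-blooded-ninjas | segment_tree/counting_even_odd.py | query_tree
-- ===== SOURCE A (Python) =====
-- def query_tree(arr, tree, start, end, s, e, treenode):
--     if e < start or s > end:
--         return [0, 0]
--
--     if start >= s and end <= e:
--         return tree[treenode]
--
--     mid = (start + end) // 2
--     opt1 = query_tree(arr, tree, start, mid, s, e, 2*treenode+1)
--     opt2 = query_tree(arr, tree, mid+1, end, s, e, 2*treenode+2)
--     return [opt1[0] + opt2[0], opt1[1] + opt2[1]]
-- ===== SOURCE B (Python) =====
-- def query_tree(arr, tree, start, end, s, e, treenode):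
--     result = [0, 0]
--     stack = [(start, end, treenode)]
--     while stack:
--         fs, fe, node = stack.pop()
--         if e < fs or s > fe:
--             continue
--         if fs >= s and fe <= e:
--             result[0] += tree[node][0]
--             result[1] += tree[node][1]
--             continue
--         mid = (fs + fe) // 2
--         stack.append((mid + 1, fe, 2 * node + 2))
--         stack.append((fs, mid, 2 * node + 1))
--     return result
-- ===== Notes on version B (the rewrite author's own statement) =====
-- stated objective: alternative
-- what changed: Replaced the recursive divide-and-conquer query with an explicit-stack iteration over (start,end,node) frames accumulating the two counts in place.
-- outside the precondition, e.g. on query_tree([], [[7]], 0, 0, 0, 0, 0): A returns [7], B raises IndexError; on query_tree([], [[1, 1], [1, 0]], 0, 1, 0, 0, 0): A returns [1, 0], B returns [1, 0]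
import Mathlib
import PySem

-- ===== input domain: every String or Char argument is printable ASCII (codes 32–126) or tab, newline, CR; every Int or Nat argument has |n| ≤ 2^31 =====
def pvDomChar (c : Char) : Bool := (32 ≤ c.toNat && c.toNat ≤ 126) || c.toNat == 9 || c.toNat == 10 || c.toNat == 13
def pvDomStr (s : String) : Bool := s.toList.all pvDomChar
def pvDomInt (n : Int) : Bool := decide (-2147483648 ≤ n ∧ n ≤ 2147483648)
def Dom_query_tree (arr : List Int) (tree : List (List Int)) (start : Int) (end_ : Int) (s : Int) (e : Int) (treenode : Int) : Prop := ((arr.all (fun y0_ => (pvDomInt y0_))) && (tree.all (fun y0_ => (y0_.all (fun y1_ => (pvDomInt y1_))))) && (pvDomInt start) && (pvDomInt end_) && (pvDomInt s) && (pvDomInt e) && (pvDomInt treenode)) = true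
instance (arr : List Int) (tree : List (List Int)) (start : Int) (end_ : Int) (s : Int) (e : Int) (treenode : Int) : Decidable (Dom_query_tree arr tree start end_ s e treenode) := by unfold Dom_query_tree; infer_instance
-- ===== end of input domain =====

-- B replaces A's recursive divide-and-conquer query by an explicit-stack iteration
-- accumulating the two counts; equivalence is about the RETURN VALUE (A may return
-- the tree's own row object, B always returns a fresh pair-list of equal value).

-- ===== PORT A =====
def query_tree (arr : List Int) (tree : List (List Int)) (start : Int) (end_ : Int) (s : Int) (e : Int) (treenode : Int) : List Int :=
  if e < start ∨ s > end_ then [0, 0]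
  else if start ≥ s ∧ end_ ≤ e then
    -- tree[treenode]: IndexError (excluded by Pre_) modelled by a junk default
    PySem.List.pyGetD tree treenode [0, 0]
  else
    let mid := PySem.Int.floordiv (start + end_) 2
    let opt1 := query_tree arr tree start mid s e (2*treenode+1)
    let opt2 := query_tree arr tree (mid+1) end_ s e (2*treenode+2)
    [PySem.List.pyGetD opt1 0 0 + PySem.List.pyGetD opt2 0 0,
     PySem.List.pyGetD opt1 1 0 + PySem.List.pyGetD opt2 1 0]
termination_by (end_ - start).toNat
decreasing_by
  all_goals
    have h := PySem.Int.floordiv_two_mid_bounds (lo := start) (hi := end_) (by omega)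
    have h2 : PySem.Int.floordiv (start + end_) 2 < end_ := by
      rw [PySem.Int.floordiv_lt_iff_lt_mul (by omega)]; omega
    omega

-- ===== PORT B =====
-- frame weight: termination measure for the explicit stack loop
def pvFrameW (f : Int × Int × Int) : Nat := 2 * (f.2.1 - f.1).toNat + 1

-- the while-stack loop of Source B: pop a frame, skip / accumulate / split
def queryLoop (tree : List (List Int)) (s e : Int) (stack : List (Int × Int × Int)) (r0 r1 : Int) : Int × Int :=
  match stack with
  | [] => (r0, r1)
  | (fs, fe, node) :: rest =>
    if e < fs ∨ s > fe then queryLoop tree s e rest r0 r1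
    else if fs ≥ s ∧ fe ≤ e then
      let row := PySem.List.pyGetD tree node [0, 0]
      queryLoop tree s e rest (r0 + PySem.List.pyGetD row 0 0) (r1 + PySem.List.pyGetD row 1 0)
    else
      let mid := PySem.Int.floordiv (fs + fe) 2
      queryLoop tree s e ((fs, mid, 2*node+1) :: (mid+1, fe, 2*node+2) :: rest) r0 r1
termination_by (stack.map pvFrameW).sum
decreasing_by
  all_goals simp only [pvFrameW, List.map_cons, List.sum_cons]
  · omega
  · omega
  · have h := PySem.Int.floordiv_two_mid_bounds (lo := fs) (hi := fe) (by omega)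
    have h2 : PySem.Int.floordiv (fs + fe) 2 < fe := by
      rw [PySem.Int.floordiv_lt_iff_lt_mul (by omega)]; omega
    omega

def query_tree_alt (arr : List Int) (tree : List (List Int)) (start : Int) (end_ : Int) (s : Int) (e : Int) (treenode : Int) : List Int :=
  let r := queryLoop tree s e [(start, end_, treenode)] 0 0
  [r.1, r.2]

-- ===== PRECONDITION & SPEC =====
-- Pre_ excludes inputs where the recursion indexes tree out of range (Python raises
-- IndexError) or where a fully-covered node's row is not a length-2 pair (A returns
-- that raw row, which B's accumulator cannot reproduce); the subtree-size bound is
-- conservative, so some queries that never reach the missing nodes are also excluded.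
def Pre_query_tree (arr : List Int) (tree : List (List Int)) (start : Int) (end_ : Int) (s : Int) (e : Int) (treenode : Int) : Prop :=
  (e < start ∨ s > end_) ∨
  (start ≥ s ∧ end_ ≤ e ∧ PySem.Raise.InRange tree.length treenode ∧
    (PySem.List.pyGetD tree treenode []).length = 2) ∨
  ((∀ l ∈ tree, l.length = 2) ∧ 0 ≤ treenode ∧
    2 ^ (Nat.clog 2 ((end_ - start).toNat + 1)) * (treenode.toNat + 2) ≤ tree.length + 1)
instance (arr : List Int) (tree : List (List Int)) (start : Int) (end_ : Int) (s : Int) (e : Int) (treenode : Int) : Decidable (Pre_query_tree arr tree start end_ s e treenode) := by unfold Pre_query_tree; infer_instance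

def pvWitness_query_tree : List Int × List (List Int) × Int × Int × Int × Int × Int :=
  ([2, 3], [[1, 1], [1, 0], [0, 1]], 0, 1, 0, 1, 0)

def Spec_query_tree (arr : List Int) (tree : List (List Int)) (start : Int) (end_ : Int) (s : Int) (e : Int) (treenode : Int) (out : List Int) : Prop := out = query_tree_alt arr tree start end_ s e treenode
instance (arr : List Int) (tree : List (List Int)) (start : Int) (end_ : Int) (s : Int) (e : Int) (treenode : Int) (out : List Int) : Decidable (Spec_query_tree arr tree start end_ s e treenode out) := by unfold Spec_query_tree; infer_instance

-- ===== CLAIM (what is proved, stated in full; the proofs are below) =====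
def Claim_equal_query_tree : Prop := ∀ (arr : List Int) (tree : List (List Int)) (start : Int) (end_ : Int) (s : Int) (e : Int) (treenode : Int), Dom_query_tree arr tree start end_ s e treenode → Pre_query_tree arr tree start end_ s e treenode → Spec_query_tree arr tree start end_ s e treenode (query_tree arr tree start end_ s e treenode)

-- ===== LEMMAS AND PROOFS =====

-- pyGetD yields an element of the list or the default
lemma getD_mem_or {α : Type} (xs : List α) (i : Int) (d : α) :
    PySem.List.pyGetD xs i d ∈ xs ∨ PySem.List.pyGetD xs i d = d := by
  by_cases h : PySem.Raise.InRange xs.length i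
  · exact Or.inl (PySem.List.pyGetD_mem xs d h)
  · right
    apply PySem.List.pyGetD_of_none
    simp [PySem.Raise.InRange] at h
    simp only [PySem.List.pyGet?, PySem.List.pyIdx?]
    split_ifs with h1 h2 h3 <;> simp_all <;> omega

-- an in-range pyGetD does not depend on the default
lemma getD_irrel {α : Type} (xs : List α) (i : Int) (d1 d2 : α)
    (h : PySem.Raise.InRange xs.length i) :
    PySem.List.pyGetD xs i d1 = PySem.List.pyGetD xs i d2 := by
  simp [PySem.List.pyGetD, PySem.List.pyGet?, PySem.List.pyIdx?, PySem.Raise.InRange] at h ⊢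
  split_ifs with h1 h2 h3
  · simp [List.getElem?_eq_getElem (show i.toNat < xs.length by omega)]
  · exact absurd h.2 h2
  · simp [List.getElem?_eq_getElem (show xs.length - (-i).toNat < xs.length by omega)]
  · exact absurd h.1 h3

lemma pair_of_len2 (l : List Int) (h : l.length = 2) : ∃ a b : Int, l = [a, b] := by
  rcases l with _ | ⟨a, _ | ⟨b, _ | _⟩⟩ <;> simp_all

-- under the all-rows-are-pairs hypothesis, A's result is always a two-element list
lemma query_tree_shape (arr : List Int) (tree : List (List Int)) (s e : Int)
    (hlen : ∀ l ∈ tree, l.length = 2) :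
    ∀ (start end_ treenode : Int), ∃ a b : Int,
      query_tree arr tree start end_ s e treenode = [a, b] := by
  intro start end_ treenode
  fun_induction query_tree arr tree start end_ s e treenode with
  | case1 => exact ⟨0, 0, rfl⟩
  | case2 h1 h2 =>
    rcases getD_mem_or tree _ ([0, 0] : List Int) with hm | hd
    · exact pair_of_len2 _ (hlen _ hm)
    · exact ⟨0, 0, hd⟩
  | case3 h1 h2 mid opt1 opt2 ih1 ih2 => exact ⟨_, _, rfl⟩

-- the loop computes the accumulator plus the sum of A's answers over the frames
lemma queryLoop_eq (arr : List Int) (tree : List (List Int)) (s e : Int)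
    (hlen : ∀ l ∈ tree, l.length = 2) :
    ∀ (stack : List (Int × Int × Int)) (r0 r1 : Int),
      queryLoop tree s e stack r0 r1 =
        (r0 + (stack.map (fun f => PySem.List.pyGetD (query_tree arr tree f.1 f.2.1 s e f.2.2) 0 0)).sum,
         r1 + (stack.map (fun f => PySem.List.pyGetD (query_tree arr tree f.1 f.2.1 s e f.2.2) 1 0)).sum) := by
  intro stack r0 r1
  fun_induction queryLoop tree s e stack r0 r1 with
  | case1 r0 r1 => simp
  | case2 r0 r1 fs fe node rest hc ih =>
    have hq : query_tree arr tree fs fe s e node = [0, 0] := by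
      rw [query_tree, if_pos hc]
    rw [ih]
    simp [hq, PySem.List.pyGetD_ofNat']
  | case3 r0 r1 fs fe node rest hc hc2 row ih =>
    have hq : query_tree arr tree fs fe s e node = PySem.List.pyGetD tree node [0, 0] := by
      rw [query_tree, if_neg hc, if_pos hc2]
    rw [ih]
    simp only [List.map_cons, List.sum_cons, hq, Prod.mk.injEq]
    constructor <;> ring
  | case4 r0 r1 fs fe node rest hc hc2 mid ih =>
    have hq : query_tree arr tree fs fe s e node =
        [PySem.List.pyGetD (query_tree arr tree fs mid s e (2*node+1)) 0 0 +
           PySem.List.pyGetD (query_tree arr tree (mid+1) fe s e (2*node+2)) 0 0,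
         PySem.List.pyGetD (query_tree arr tree fs mid s e (2*node+1)) 1 0 +
           PySem.List.pyGetD (query_tree arr tree (mid+1) fe s e (2*node+2)) 1 0] := by
      rw [query_tree, if_neg hc, if_neg hc2]
    rw [ih]
    simp only [List.map_cons, List.sum_cons, hq, PySem.List.pyGetD_ofNat']
    simp only [List.getD, List.getElem?_cons_zero, List.getElem?_cons_succ, Option.getD_some,
      Prod.mk.injEq]
    constructor <;> ring

-- ===== VERDICT (by name: the statement is the Claim_ definition above) =====
theorem query_tree_spec : Claim_equal_query_tree := by
  intro arr tree start end_ s e treenode hdom hpre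
  unfold Spec_query_tree query_tree_alt
  rcases hpre with hdisj | ⟨h1, h2, hin, hrow⟩ | ⟨hlen, _, _⟩
  · rw [query_tree, if_pos hdisj]
    rw [queryLoop, if_pos hdisj, queryLoop]
  · by_cases hd : e < start ∨ s > end_
    · rw [query_tree, if_pos hd]
      rw [queryLoop, if_pos hd, queryLoop]
    · have hsame : PySem.List.pyGetD tree treenode ([0, 0] : List Int) =
          PySem.List.pyGetD tree treenode [] := getD_irrel tree treenode _ _ hin
      obtain ⟨va, vb, hab⟩ := pair_of_len2 _ hrow
      rw [query_tree, if_neg hd, if_pos ⟨h1, h2⟩]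
      rw [queryLoop, if_neg hd, if_pos ⟨h1, h2⟩, queryLoop]
      simp [hsame, hab, PySem.List.pyGetD_ofNat']
  · obtain ⟨a, b, hab⟩ := query_tree_shape arr tree s e hlen start end_ treenode
    rw [queryLoop_eq arr tree s e hlen]
    simp [hab, PySem.List.pyGetD_ofNat']
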